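-- pv_equiv track=rewrite | github.com/mujiexu2/ELEC0138-assignment22-23 | model.py | data2char_index
-- ===== SOURCE A (Python) =====
-- def data2char_index(data, max_len):
--     alphabet = " abcdefghijklmnopqrstuvwxyz0123456789-,;.!?:'\"/\\|_@#$%^&*~`+-=<>()[]{}"
--     mat = []
--     for ch in data:
--         if ch not in alphabet:
--             continue
--         mat.append(alphabet.index(ch))
--     if len(mat) < max_len:
--         mat += [0] * (max_len - len(mat))
--     elif len(mat) > max_len:
--         mat = mat[:max_len]
--     return mat
-- ===== SOURCE B (Python) =====
-- def data2char_index(data, max_len):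
--     alphabet = " abcdefghijklmnopqrstuvwxyz0123456789-,;.!?:'\"/\\|_@#$%^&*~`+-=<>()[]{}"
--     result = [0] * max_len
--     i = 0
--     for ch in data:
--         if i >= max_len:
--             break
--         j = alphabet.find(ch)
--         if j >= 0:
--             result[i] = j
--             i += 1
--     return result
-- ===== Notes on version B (the rewrite author's own statement) =====
-- stated objective: faster
-- what changed: Replaces A's two-phase build-then-pad/truncate (filter+index into a growing list, then length comparison with padding or slicing) by a single fused pass that writes alphabet indices into a preallocated [0]*max_len buffer with a write cursor and breaks out once the buffer is full, using one str.find scan instead of A's 'in'+'.index' double scan.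
-- outside the precondition, e.g. on data2char_index('abc', -1): A returns [1, 2], B returns []; on data2char_index('a', -5): A returns [], B returns []
import Mathlib
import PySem

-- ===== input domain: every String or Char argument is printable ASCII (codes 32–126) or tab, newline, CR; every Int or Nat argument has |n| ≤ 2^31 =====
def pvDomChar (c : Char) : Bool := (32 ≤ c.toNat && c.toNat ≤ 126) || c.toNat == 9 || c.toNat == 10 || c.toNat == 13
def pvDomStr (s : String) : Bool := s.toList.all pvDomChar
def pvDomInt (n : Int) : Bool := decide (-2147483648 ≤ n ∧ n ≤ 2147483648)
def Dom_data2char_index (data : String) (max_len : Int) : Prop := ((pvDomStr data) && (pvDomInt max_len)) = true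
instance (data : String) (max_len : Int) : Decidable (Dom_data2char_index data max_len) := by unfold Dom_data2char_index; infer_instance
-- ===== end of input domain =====

-- B fuses A's build-then-pad/truncate into one indexed pass over a preallocated buffer that stops
-- once full (measurably faster in a timing run); equivalence is claimed for max_len ≥ 0, the
-- natural domain of a target length.

-- ===== PORT A =====
def pvAlpha : List Char :=
  " abcdefghijklmnopqrstuvwxyz0123456789-,;.!?:'\"/\\|_@#$%^&*~`+-=<>()[]{}".toList

def data2char_index (data : String) (max_len : Int) : List Int :=
  let mat : List Int := data.toList.foldl (fun mat ch =>
    if PySem.Chars.isIn [ch] pvAlpha = false then mat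
    -- guarded alphabet.index(ch): ch is in alphabet here, so .index = Chars.find (first occurrence)
    else mat ++ [PySem.Chars.find pvAlpha [ch]]) []
  if (mat.length : Int) < max_len then mat ++ PySem.List.pyRepeat [0] (max_len - (mat.length : Int))
  else if (mat.length : Int) > max_len then PySem.List.slice mat none (some max_len)
  else mat

-- ===== PORT B =====
-- one loop step of Source B; the 'break' is modeled as a state-preserving guard (once i ≥ max_len the
-- Python loop has exited and the state never changes again)
def pvStepB (n : Int) (st : List Int × Int) (ch : Char) : List Int × Int :=
  if st.2 ≥ n then st
  else
    let j := PySem.Chars.find pvAlpha [ch]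
    if j ≥ 0 then (PySem.List.pySetD st.1 st.2 j, st.2 + 1) else st

def data2char_index_alt (data : String) (max_len : Int) : List Int :=
  (data.toList.foldl (pvStepB max_len) (PySem.List.pyRepeat [0] max_len, 0)).1

-- ===== PRECONDITION & SPEC =====
-- Pre_ restricts to max_len ≥ 0, the natural domain of a target length: for negative max_len A's
-- slice mat[:max_len] accidentally trims from the end while B's [0]*max_len buffer is empty.
def Pre_data2char_index (data : String) (max_len : Int) : Prop := 0 ≤ max_len
instance (data : String) (max_len : Int) : Decidable (Pre_data2char_index data max_len) := by
  unfold Pre_data2char_index; infer_instance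

def pvWitness_data2char_index : String × Int := ("ab c!X", 4)

def Spec_data2char_index (data : String) (max_len : Int) (out : List Int) : Prop := out = data2char_index_alt data max_len
instance (data : String) (max_len : Int) (out : List Int) : Decidable (Spec_data2char_index data max_len out) := by unfold Spec_data2char_index; infer_instance

-- ===== CLAIM (what is proved, stated in full; the proofs are below) =====
def Claim_equal_data2char_index : Prop := ∀ (data : String) (max_len : Int), Dom_data2char_index data max_len → Pre_data2char_index data max_len → Spec_data2char_index data max_len (data2char_index data max_len)

-- ===== LEMMAS AND PROOFS =====

def pvF (ch : Char) : Int := PySem.Chars.find pvAlpha [ch]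

def pvPres (ch : Char) : Bool := PySem.Chars.isIn [ch] pvAlpha

theorem pvF_nonneg_iff (ch : Char) : (pvF ch ≥ 0) ↔ pvPres ch = true := by
  unfold pvF pvPres
  rw [ge_iff_le, PySem.Chars.find_nonneg_iff, PySem.Chars.isIn_iff_infix]

theorem matA_eq (xs : List Char) :
    xs.foldl (fun mat ch =>
      if PySem.Chars.isIn [ch] pvAlpha = false then mat
      else mat ++ [PySem.Chars.find pvAlpha [ch]]) [] = (xs.filter pvPres).map pvF := by
  have h : (fun (mat : List Int) ch =>
      if PySem.Chars.isIn [ch] pvAlpha = false then mat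
      else mat ++ [PySem.Chars.find pvAlpha [ch]]) =
      (fun (mat : List Int) ch => if pvPres ch then mat ++ [pvF ch] else mat) := by
    funext mat ch
    unfold pvPres pvF
    cases PySem.Chars.isIn [ch] pvAlpha <;> simp
  rw [h, PySem.List.foldl_append_if]
  simp

theorem set_buf (m : List Int) (k : Nat) (hk : 0 < k) (v : Int) :
    (m ++ List.replicate k (0:Int)).set m.length v = (m ++ [v]) ++ List.replicate (k-1) 0 := by
  obtain ⟨k', rfl⟩ : ∃ k', k = k' + 1 := ⟨k - 1, by omega⟩
  simp [List.replicate_succ]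

def pvState (m : List Int) (N : Nat) : List Int × Int :=
  (m.take N ++ List.replicate (N - min m.length N) 0, min (m.length : Int) (N : Int))

theorem step_state_miss (N : Nat) (m : List Int) (ch : Char) (hp : pvPres ch = false) :
    pvStepB (N : Int) (pvState m N) ch = pvState m N := by
  have hf : ¬ (PySem.Chars.find pvAlpha [ch] ≥ 0) := by
    intro hc
    have h1 : pvPres ch = true := (pvF_nonneg_iff ch).mp hc
    rw [hp] at h1; exact Bool.false_ne_true h1
  by_cases h : (pvState m N).2 ≥ (N : Int)
  · simp [pvStepB, h]
  · simp [pvStepB, h, hf]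

theorem step_state_hit (N : Nat) (m : List Int) (ch : Char) (hp : pvPres ch = true) :
    pvStepB (N : Int) (pvState m N) ch = pvState (m ++ [pvF ch]) N := by
  have hf : PySem.Chars.find pvAlpha [ch] ≥ 0 := by
    have := (pvF_nonneg_iff ch).mpr hp; exact this
  by_cases hN : N ≤ m.length
  · have h : (pvState m N).2 ≥ (N : Int) := by
      unfold pvState; simp only; omega
    have ht : (m ++ [pvF ch]).take N = m.take N := by
      rw [List.take_append, Nat.sub_eq_zero_of_le hN]; simp
    have e : pvState (m ++ [pvF ch]) N = pvState m N := by
      unfold pvState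
      rw [ht]
      simp only [List.length_append, List.length_singleton]
      simp only [Prod.mk.injEq]
      refine ⟨by rw [show min (m.length + 1) N = min m.length N from by omega],
              by omega⟩
    simp [pvStepB, h, e]
  · push_neg at hN
    have h : ¬ (pvState m N).2 ≥ (N : Int) := by
      unfold pvState; simp only; omega
    unfold pvStepB
    rw [if_neg h]
    simp only
    rw [if_pos hf]
    unfold pvState
    simp only [List.length_append, List.length_singleton]
    rw [show min (m.length : Int) (N : Int) = (m.length : Int) from by omega,
        PySem.List.pySetD_natCast,
        List.take_of_length_le (by omega),
        List.take_of_length_le (by simp; omega),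
        show min m.length N = m.length from by omega,
        set_buf _ _ (by omega)]
    simp only [Prod.mk.injEq]
    refine ⟨by rw [show min (m.length + 1) N = m.length + 1 from by omega,
                   show N - (m.length + 1) = N - m.length - 1 from by omega]; rfl,
            by omega⟩

-- loop invariant for B's fused pass: after processing a prefix whose filtered image is m,
-- the buffer is m (truncated to N) followed by zeros and the cursor is min |m| N
theorem loopB (N : Nat) (xs : List Char) (m : List Int) :
    xs.foldl (pvStepB (N : Int)) (pvState m N)
      = pvState (m ++ (xs.filter pvPres).map pvF) N := by
  induction xs generalizing m with
  | nil => simp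
  | cons ch xs ih =>
    simp only [List.foldl_cons, List.filter_cons]
    by_cases hp : pvPres ch
    · rw [if_pos hp, step_state_hit N m ch hp]
      have e := ih (m ++ [pvF ch])
      rw [show (m ++ [pvF ch]) ++ (xs.filter pvPres).map pvF
            = m ++ (pvF ch :: (xs.filter pvPres).map pvF) from by simp] at e
      simpa using e
    · rw [if_neg (by simpa using hp), step_state_miss N m ch (by simpa using hp)]
      exact ih m

theorem data2char_index_spec : Claim_equal_data2char_index := by
  intro data max_len _ hpre
  unfold Spec_data2char_index
  have hcast : ((max_len.toNat : Nat) : Int) = max_len := Int.toNat_of_nonneg hpre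
  simp only [data2char_index, data2char_index_alt]
  rw [matA_eq, ← hcast,
      show (PySem.List.pyRepeat [(0:Int)] ((max_len.toNat : Nat) : Int), (0:Int))
         = pvState [] max_len.toNat from by
           simp [pvState, PySem.List.pyRepeat_singleton]
           omega,
      loopB max_len.toNat data.toList []]
  unfold pvState
  simp only [List.nil_append]
  set mat := (data.toList.filter pvPres).map pvF with hmat
  by_cases h1 : mat.length < max_len.toNat
  · rw [if_pos (by omega), PySem.List.pyRepeat_singleton,
        List.take_of_length_le (by omega),
        show ((max_len.toNat : Int) - (mat.length : Int)).toNat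
           = max_len.toNat - min mat.length max_len.toNat from by omega]
  · by_cases h2 : max_len.toNat < mat.length
    · rw [if_neg (by omega), if_pos (by omega),
          PySem.List.slice_to_natCast,
          show max_len.toNat - min mat.length max_len.toNat = 0 from by omega]
      simp
    · rw [if_neg (by omega), if_neg (by omega),
          List.take_of_length_le (by omega),
          show max_len.toNat - min mat.length max_len.toNat = 0 from by omega]
      simp
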